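-- pv_equiv track=rewrite | github.com/sevanboyajian/mlb_stats | batch/pipeline/score_game.py | _dedup_signal_id_scores
-- ===== SOURCE A (Python) =====
-- def _dedup_signal_id_scores(
--     id_score_pairs: list[tuple[str, int]],
-- ) -> list[tuple[str, int]]:
--     """One row per ``signal_id``, highest ``confidence_score`` wins; sort score desc, then id."""
--     best: dict[str, int] = {}
--     for sid, sc in id_score_pairs:
--         s = (sid or "").strip()
--         if not s:
--             continue
--         v = int(sc)
--         if s not in best or v > best[s]:
--             best[s] = v
--     return sorted(best.items(), key=lambda x: (-x[1], x[0]))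
-- ===== SOURCE B (Python) =====
-- def _dedup_signal_id_scores(
--     id_score_pairs: list[tuple[str, int]],
-- ) -> list[tuple[str, int]]:
--     """One row per signal_id, highest confidence_score wins; sort score desc, then id."""
--     cleaned = []
--     for sid, sc in id_score_pairs:
--         s = (sid or "").strip()
--         if s:
--             cleaned.append((s, int(sc)))
--     order = list(dict.fromkeys(s for s, _ in cleaned))
--     groups = {}
--     for s, v in cleaned:
--         groups.setdefault(s, []).append(v)
--     dedup = [(s, max(groups[s])) for s in order]
--     return sorted(dedup, key=lambda x: (-x[1], x[0]))
-- ===== Notes on version B (the rewrite author's own statement) =====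
-- stated objective: alternative
-- what changed: A keeps one running-max dict updated online with a membership test per row; B first materialises the cleaned rows, ordered-dedups the ids, groups all scores per id in a dict of lists, then takes the max of each group before the same final sort.
import Mathlib
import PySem

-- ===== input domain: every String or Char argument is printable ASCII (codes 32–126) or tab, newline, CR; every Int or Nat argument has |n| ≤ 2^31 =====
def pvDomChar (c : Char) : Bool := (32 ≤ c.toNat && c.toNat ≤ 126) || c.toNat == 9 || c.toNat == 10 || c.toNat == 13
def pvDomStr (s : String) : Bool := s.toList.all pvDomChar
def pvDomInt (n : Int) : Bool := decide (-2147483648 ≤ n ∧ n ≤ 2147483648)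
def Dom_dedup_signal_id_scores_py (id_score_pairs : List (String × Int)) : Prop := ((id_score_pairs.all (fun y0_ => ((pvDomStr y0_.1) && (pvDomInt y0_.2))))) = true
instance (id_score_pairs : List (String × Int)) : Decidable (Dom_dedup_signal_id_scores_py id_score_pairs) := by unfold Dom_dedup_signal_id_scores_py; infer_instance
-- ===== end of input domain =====

-- B replaces A's online running-max dict by a clean-then-group decomposition: strip/filter once,
-- ordered-dedup the ids, collect each id's scores in a group dict, take max per group, same final sort
-- (objective: alternative decomposition, same cost).

-- ===== PORT A =====
def dedup_signal_id_scores_py (id_score_pairs : List (String × Int)) : List (String × Int) :=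
  let best : PySem.Dict String Int := id_score_pairs.foldl
    (fun best p =>
      let s := PySem.Str.strip (if p.1 = "" then "" else p.1)   -- s = (sid or "").strip()
      if s = "" then best                                       -- if not s: continue
      -- 's not in best or v > best[s]': the getD default 0 is unread (read only when contains holds)
      else if best.contains s = false ∨ best.getD s 0 < p.2
        then best.insert s p.2 else best)
    PySem.Dict.empty
  PySem.List.sorted2 best.items (fun x => -x.2) (fun x => x.1)

-- ===== PORT B =====
-- max(vs): every call site in Source B passes a nonempty list, so the default 0 for [] is unreachable
def pvMaxList (vs : List Int) : Int := (PySem.List.max? vs (fun y => y)).getD 0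

def dedup_signal_id_scores_py_alt (id_score_pairs : List (String × Int)) : List (String × Int) :=
  let cleaned : List (String × Int) := id_score_pairs.foldl
    (fun acc p =>
      let s := PySem.Str.strip (if p.1 = "" then "" else p.1)
      if s ≠ "" then acc ++ [(s, p.2)] else acc) []
  let order : List String := PySem.List.dedup (cleaned.map (·.1))
  let groups : PySem.Dict String (List Int) := cleaned.foldl
    (fun d p => d.modify p.1 [] (· ++ [p.2])) PySem.Dict.empty
  let dedup := order.map (fun s => (s, pvMaxList (groups.getD s [])))
  PySem.List.sorted2 dedup (fun x => -x.2) (fun x => x.1)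

-- ===== PRECONDITION & SPEC =====
def Spec_dedup_signal_id_scores_py (id_score_pairs : List (String × Int)) (out : List (String × Int)) : Prop := out = dedup_signal_id_scores_py_alt id_score_pairs
instance (id_score_pairs : List (String × Int)) (out : List (String × Int)) : Decidable (Spec_dedup_signal_id_scores_py id_score_pairs out) := by unfold Spec_dedup_signal_id_scores_py; infer_instance

-- ===== CLAIM (what is proved, stated in full; the proofs are below) =====
def Claim_equal_dedup_signal_id_scores_py : Prop := ∀ (id_score_pairs : List (String × Int)), Dom_dedup_signal_id_scores_py id_score_pairs → Spec_dedup_signal_id_scores_py id_score_pairs (dedup_signal_id_scores_py id_score_pairs)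

-- ===== LEMMAS AND PROOFS =====

/-- The cleaning both programs perform on a row: '(sid or "").strip()', keep the score. -/
def pvClean (p : String × Int) : String × Int :=
  (PySem.Str.strip (if p.1 = "" then "" else p.1), p.2)

def pvKeep (p : String × Int) : Bool := !((pvClean p).1 == "")

/-- The cleaned rows: the rows both loops act on, already stripped, empty ids dropped. -/
def pvCleaned (l : List (String × Int)) : List (String × Int) := (l.filter pvKeep).map pvClean

/-- A's dict update for one cleaned row. -/
def pvStepA (d : PySem.Dict String Int) (p : String × Int) : PySem.Dict String Int :=
  if d.contains p.1 = false ∨ d.getD p.1 0 < p.2 then d.insert p.1 p.2 else d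

/-- Running max on an optional accumulator. -/
def pvOmax (o : Option Int) (v : Int) : Option Int :=
  match o with | none => some v | some w => some (max w v)

/-- A's loop over the raw rows is its dict update over the cleaned rows. -/
theorem pvFoldA_eq (l : List (String × Int)) :
    ∀ d : PySem.Dict String Int,
    l.foldl (fun best p =>
      if PySem.Str.strip (if p.1 = "" then "" else p.1) = "" then best
      else if best.contains (PySem.Str.strip (if p.1 = "" then "" else p.1)) = false
              ∨ best.getD (PySem.Str.strip (if p.1 = "" then "" else p.1)) 0 < p.2
        then best.insert (PySem.Str.strip (if p.1 = "" then "" else p.1)) p.2 else best) d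
    = (pvCleaned l).foldl pvStepA d := by
  induction l with
  | nil => intro d; rfl
  | cons p t ih =>
    intro d
    simp only [List.foldl_cons]
    by_cases h : PySem.Str.strip (if p.1 = "" then "" else p.1) = ""
    · have hk : pvKeep p = false := by simp [pvKeep, pvClean, h]
      rw [if_pos h]
      simp only [pvCleaned, List.filter_cons, hk, Bool.false_eq_true, if_false]
      exact ih d
    · have hk : pvKeep p = true := by simp [pvKeep, pvClean, h]
      rw [if_neg h]
      simp only [pvCleaned, List.filter_cons, hk, if_true, List.map_cons, List.foldl_cons]
      exact ih _

/-- B's cleaning loop builds exactly the cleaned rows. -/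
theorem pvFoldB_eq (l : List (String × Int)) :
    ∀ acc : List (String × Int),
    l.foldl (fun acc p =>
      if PySem.Str.strip (if p.1 = "" then "" else p.1) ≠ "" then
        acc ++ [(PySem.Str.strip (if p.1 = "" then "" else p.1), p.2)] else acc) acc
    = acc ++ pvCleaned l := by
  induction l with
  | nil => intro acc; simp [pvCleaned]
  | cons p t ih =>
    intro acc
    simp only [List.foldl_cons]
    by_cases h : PySem.Str.strip (if p.1 = "" then "" else p.1) = ""
    · have hk : pvKeep p = false := by simp [pvKeep, pvClean, h]
      rw [if_neg (by simpa using h)]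
      simp only [pvCleaned, List.filter_cons, hk, Bool.false_eq_true, if_false]
      exact ih acc
    · have hk : pvKeep p = true := by simp [pvKeep, pvClean, h]
      rw [if_pos h]
      simp only [pvCleaned, List.filter_cons, hk, if_true, List.map_cons]
      rw [ih]
      simp [pvClean, pvCleaned]

theorem pvStepA_get? (d : PySem.Dict String Int) (p : String × Int) (x : String) :
    (pvStepA d p).get? x = if x = p.1 then pvOmax (d.get? p.1) p.2 else d.get? x := by
  unfold pvStepA
  cases h : d.get? p.1 with
  | none =>
    have hc : d.contains p.1 = false := by
      rw [PySem.Dict.contains_eq_isSome_get?, h]; rfl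
    rw [if_pos (Or.inl hc), PySem.Dict.get?_insert]
    by_cases hx : x = p.1
    · rw [if_pos hx, if_pos hx]; simp [pvOmax]
    · rw [if_neg hx, if_neg hx]
  | some w =>
    have hc : d.contains p.1 = true := by
      rw [PySem.Dict.contains_eq_isSome_get?, h]; rfl
    have hg : d.getD p.1 0 = w := PySem.Dict.getD_of_get?_eq_some d 0 h
    by_cases hlt : w < p.2
    · rw [if_pos (Or.inr (by rw [hg]; exact hlt)), PySem.Dict.get?_insert]
      by_cases hx : x = p.1
      · rw [if_pos hx, if_pos hx]
        simp [pvOmax, max_eq_right (le_of_lt hlt)]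
      · rw [if_neg hx, if_neg hx]
    · rw [if_neg (by simp [hc, hg, hlt])]
      by_cases hx : x = p.1
      · rw [if_pos hx, hx]
        simp [pvOmax, h, max_eq_left (not_lt.mp hlt)]
      · rw [if_neg hx]

theorem pvStepA_keys (d : PySem.Dict String Int) (p : String × Int) :
    (pvStepA d p).keys = PySem.Set.add d.keys p.1 := by
  unfold pvStepA
  by_cases hc : d.contains p.1 = true
  · have hm : p.1 ∈ d.keys := (PySem.Dict.contains_iff_mem_keys d p.1).mp hc
    have hadd : PySem.Set.add d.keys p.1 = d.keys := by
      simp [PySem.Set.add, PySem.Set.contains, hm]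
    by_cases hlt : d.getD p.1 0 < p.2
    · rw [if_pos (Or.inr hlt), PySem.Dict.keys_insert_of_contains _ _ hc, hadd]
    · rw [if_neg (by simp [hc, hlt]), hadd]
  · have hcf : d.contains p.1 = false := by simpa using hc
    have hm : p.1 ∉ d.keys := fun m => hc ((PySem.Dict.contains_iff_mem_keys d p.1).mpr m)
    rw [if_pos (Or.inl hcf), PySem.Dict.keys_insert_of_not_contains _ _ hcf]
    simp [PySem.Set.add, PySem.Set.contains, hm]

/-- Invariant of A's loop over the cleaned rows: keys in first-appearance order, value = running max. -/
theorem pvFoldStepA (cl : List (String × Int)) :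
    ∀ d : PySem.Dict String Int,
    (cl.foldl pvStepA d).keys = PySem.Set.update d.keys (cl.map (·.1))
    ∧ ∀ x, (cl.foldl pvStepA d).get? x
        = ((cl.filter (fun q => q.1 == x)).map (·.2)).foldl pvOmax (d.get? x) := by
  induction cl with
  | nil => intro d; exact ⟨rfl, fun x => rfl⟩
  | cons p t ih =>
    intro d
    obtain ⟨hk, hg⟩ := ih (pvStepA d p)
    constructor
    · rw [List.foldl_cons, hk, pvStepA_keys]; rfl
    · intro x
      rw [List.foldl_cons, hg x, pvStepA_get?, List.filter_cons]
      by_cases hx : x = p.1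
      · simp [hx]
      · have hb : (p.1 == x) = false := by simpa using fun hh => hx hh.symm
        simp [hx, hb]

theorem pvOmax_some (t : List Int) : ∀ a, t.foldl pvOmax (some a) = some (t.foldl max a) := by
  induction t with
  | nil => intro a; rfl
  | cons v t ih => intro a; simpa [pvOmax] using ih (max a v)

-- ===== VERDICT (by name: the statement is the Claim_ definition above) =====
theorem dedup_signal_id_scores_py_spec : Claim_equal_dedup_signal_id_scores_py := by
  intro l _
  show dedup_signal_id_scores_py l = dedup_signal_id_scores_py_alt l
  unfold dedup_signal_id_scores_py dedup_signal_id_scores_py_alt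
  dsimp only
  rw [pvFoldA_eq, pvFoldB_eq, List.nil_append]
  obtain ⟨hk, hg⟩ := pvFoldStepA (pvCleaned l) PySem.Dict.empty
  have hkeys : ((pvCleaned l).foldl pvStepA PySem.Dict.empty).keys
      = PySem.Set.ofList ((pvCleaned l).map (·.1)) := hk
  have hnd : ((pvCleaned l).foldl pvStepA PySem.Dict.empty).keys.Nodup := by
    rw [hkeys]; exact PySem.Set.nodup_ofList _
  rw [PySem.Dict.items_eq_map_keys _ hnd 0, hkeys]
  show PySem.List.sorted2 _ _ _ = PySem.List.sorted2 _ _ _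
  congr 1
  rw [show PySem.List.dedup ((pvCleaned l).map (·.1))
        = PySem.Set.ofList ((pvCleaned l).map (·.1)) from rfl]
  apply List.map_congr_left
  intro s hs
  have hsmem : s ∈ (pvCleaned l).map (·.1) := (PySem.Set.mem_ofList _ s).mp hs
  obtain ⟨q, hq, hq1⟩ := List.mem_map.mp hsmem
  have hqf : q ∈ (pvCleaned l).filter (fun q => q.1 == s) := by
    simp [List.mem_filter, hq, hq1]
  have hne : (((pvCleaned l).filter (fun q => q.1 == s)).map (·.2)) ≠ [] := by
    intro h
    have := List.mem_map_of_mem (f := (·.2)) hqf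
    rw [h] at this
    exact absurd this (List.not_mem_nil)
  obtain ⟨v, vs, hvs⟩ := List.exists_cons_of_ne_nil hne
  have hA : ((pvCleaned l).foldl pvStepA PySem.Dict.empty).getD s 0 = vs.foldl max v := by
    rw [PySem.Dict.getD_eq_get?_getD, hg s, PySem.Dict.get?_empty, hvs, List.foldl_cons]
    show (vs.foldl pvOmax (some v)).getD 0 = vs.foldl max v
    rw [pvOmax_some]; rfl
  have hB : ((pvCleaned l).foldl (fun d p => d.modify p.1 [] (· ++ [p.2]))
      PySem.Dict.empty).getD s [] = v :: vs := by
    rw [PySem.Dict.getD_foldl_modify_append]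
    simpa using hvs
  rw [hA, hB]
  rw [show pvMaxList (v :: vs) = ((PySem.List.max? (v :: vs) (fun y => y)).getD 0) from rfl,
    PySem.List.max?_id_cons]
  rfl
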